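-- pv_equiv track=rewrite | github.com/akshay-greenlang/Code-V1_GreenLang | packs/ghg-accounting/PACK-048-assurance-prep/templates/regulatory_requirement_report.py | _html_compliance_matrix
-- ===== SOURCE A (Python) =====
-- from typing import Any, Dict, List, Optional
--
-- def _html_compliance_matrix(data: Dict[str, Any]) -> str:
--     """Render HTML compliance status summary."""
--     reqs = data.get("requirements", [])
--     if not reqs:
--         return ""
--     compliant = sum(1 for r in reqs if r.get("compliance_status") == "compliant")
--     gap = sum(1 for r in reqs if r.get("compliance_status") == "gap")
--     progress = sum(1 for r in reqs if r.get("compliance_status") == "in_progress")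
--     na = sum(1 for r in reqs if r.get("compliance_status") == "not_applicable")
--     rows = (
--         f'<tr><td class="st-compliant">Compliant</td><td>{compliant}</td></tr>\n'
--         f'<tr><td class="st-gap">Gap</td><td>{gap}</td></tr>\n'
--         f'<tr><td class="st-progress">In Progress</td><td>{progress}</td></tr>\n'
--         f'<tr><td class="st-na">Not Applicable</td><td>{na}</td></tr>\n'
--         f"<tr><td><strong>Total</strong></td><td><strong>{len(reqs)}</strong></td></tr>\n"
--     )
--     return (
--         '<div class="section">\n<h2>2. Compliance Status Summary</h2>\n'
--         "<table><thead><tr><th>Status</th><th>Count</th></tr></thead>\n"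
--         f"<tbody>{rows}</tbody></table>\n</div>"
--     )
-- ===== SOURCE B (Python) =====
-- STATUSES = ("compliant", "gap", "in_progress", "not_applicable")
-- CLASSES = ("st-compliant", "st-gap", "st-progress", "st-na")
-- LABELS = ("Compliant", "Gap", "In Progress", "Not Applicable")
--
--
-- def _html_compliance_matrix(data):
--     """Render HTML compliance status summary (one pass, vector accumulator + table-driven rows)."""
--     reqs = data.get("requirements", [])
--     if not reqs:
--         return ""
--     counts = (0, 0, 0, 0)
--     for r in reqs:
--         s = r.get("compliance_status")
--         counts = tuple(c + (s == k) for c, k in zip(counts, STATUSES))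
--     body_rows = "".join(
--         f'<tr><td class="{cls}">{lbl}</td><td>{cnt}</td></tr>\n'
--         for cls, lbl, cnt in zip(CLASSES, LABELS, counts)
--     )
--     rows = body_rows + (
--         f"<tr><td><strong>Total</strong></td><td><strong>{len(reqs)}</strong></td></tr>\n"
--     )
--     return (
--         '<div class="section">\n<h2>2. Compliance Status Summary</h2>\n'
--         "<table><thead><tr><th>Status</th><th>Count</th></tr></thead>\n"
--         f"<tbody>{rows}</tbody></table>\n</div>"
--     )
-- ===== Notes on version B (the rewrite author's own statement) =====
-- stated objective: alternative
-- what changed: Replaces A's four separate counting scans with one pass carrying a 4-vector count accumulator updated by zipping against the status table, and replaces the four hard-coded row f-strings with table-driven rendering (join over zipped class/label/count tables).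
import Mathlib
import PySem

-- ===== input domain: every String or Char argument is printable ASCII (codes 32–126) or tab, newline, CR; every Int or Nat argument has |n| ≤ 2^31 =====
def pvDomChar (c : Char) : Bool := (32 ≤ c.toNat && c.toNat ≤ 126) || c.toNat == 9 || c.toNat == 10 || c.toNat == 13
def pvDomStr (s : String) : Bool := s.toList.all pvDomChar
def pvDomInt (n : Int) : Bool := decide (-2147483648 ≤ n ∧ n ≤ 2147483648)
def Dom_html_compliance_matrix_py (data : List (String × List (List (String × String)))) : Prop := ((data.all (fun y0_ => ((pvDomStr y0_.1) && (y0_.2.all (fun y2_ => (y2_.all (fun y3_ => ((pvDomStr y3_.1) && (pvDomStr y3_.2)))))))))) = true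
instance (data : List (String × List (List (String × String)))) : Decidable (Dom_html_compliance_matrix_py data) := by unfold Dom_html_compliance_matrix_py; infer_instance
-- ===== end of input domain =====

-- B replaces A's four counting scans and four hard-coded rows with one pass over a 4-vector count
-- accumulator and table-driven row rendering; output identical.

-- ===== PORT A =====
def html_compliance_matrix_py (data : List (String × List (List (String × String)))) : String :=
  let reqs := (PySem.Dict.mk data).getD "requirements" []
  if reqs = [] then ""
  else
    let compliant : Int := reqs.foldl (fun acc r => if (PySem.Dict.mk r).get? "compliance_status" == some "compliant" then acc + 1 else acc) 0
    let gap : Int := reqs.foldl (fun acc r => if (PySem.Dict.mk r).get? "compliance_status" == some "gap" then acc + 1 else acc) 0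
    let progress : Int := reqs.foldl (fun acc r => if (PySem.Dict.mk r).get? "compliance_status" == some "in_progress" then acc + 1 else acc) 0
    let na : Int := reqs.foldl (fun acc r => if (PySem.Dict.mk r).get? "compliance_status" == some "not_applicable" then acc + 1 else acc) 0
    let rows :=
      "<tr><td class=\"st-compliant\">Compliant</td><td>" ++ PySem.Int.toStr compliant ++ "</td></tr>\n" ++
      "<tr><td class=\"st-gap\">Gap</td><td>" ++ PySem.Int.toStr gap ++ "</td></tr>\n" ++
      "<tr><td class=\"st-progress\">In Progress</td><td>" ++ PySem.Int.toStr progress ++ "</td></tr>\n" ++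
      "<tr><td class=\"st-na\">Not Applicable</td><td>" ++ PySem.Int.toStr na ++ "</td></tr>\n" ++
      "<tr><td><strong>Total</strong></td><td><strong>" ++ PySem.Int.toStr (reqs.length : Int) ++ "</strong></td></tr>\n"
    "<div class=\"section\">\n<h2>2. Compliance Status Summary</h2>\n" ++
    "<table><thead><tr><th>Status</th><th>Count</th></tr></thead>\n" ++
    "<tbody>" ++ rows ++ "</tbody></table>\n</div>"

-- ===== PORT B =====
-- module-level tables of Source B
def pvStatuses : List String := ["compliant", "gap", "in_progress", "not_applicable"]
def pvClasses : List String := ["st-compliant", "st-gap", "st-progress", "st-na"]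
def pvLabels : List String := ["Compliant", "Gap", "In Progress", "Not Applicable"]

def html_compliance_matrix_py_alt (data : List (String × List (List (String × String)))) : String :=
  let reqs := (PySem.Dict.mk data).getD "requirements" []
  if reqs = [] then ""
  else
    -- one pass: 4-vector accumulator, updated by zipping against the status table
    let counts : List Int := reqs.foldl
      (fun c r =>
        let s := (PySem.Dict.mk r).get? "compliance_status"
        (c.zip pvStatuses).map (fun p => p.1 + (if s == some p.2 then 1 else 0)))
      [0, 0, 0, 0]
    -- table-driven rendering: join over zip(CLASSES, LABELS, counts)
    let body_rows := String.join (((pvClasses.zip pvLabels).zip counts).map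
      (fun t => "<tr><td class=\"" ++ t.1.1 ++ "\">" ++ t.1.2 ++ "</td><td>" ++ PySem.Int.toStr t.2 ++ "</td></tr>\n"))
    let rows := body_rows ++ "<tr><td><strong>Total</strong></td><td><strong>" ++ PySem.Int.toStr (reqs.length : Int) ++ "</strong></td></tr>\n"
    "<div class=\"section\">\n<h2>2. Compliance Status Summary</h2>\n" ++
    "<table><thead><tr><th>Status</th><th>Count</th></tr></thead>\n" ++
    "<tbody>" ++ rows ++ "</tbody></table>\n</div>"

-- ===== PRECONDITION & SPEC =====
def Spec_html_compliance_matrix_py (data : List (String × List (List (String × String)))) (out : String) : Prop := out = html_compliance_matrix_py_alt data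
instance (data : List (String × List (List (String × String)))) (out : String) : Decidable (Spec_html_compliance_matrix_py data out) := by unfold Spec_html_compliance_matrix_py; infer_instance

-- ===== CLAIM (what is proved, stated in full; the proofs are below) =====
def Claim_equal_html_compliance_matrix_py : Prop := ∀ (data : List (String × List (List (String × String)))), Dom_html_compliance_matrix_py data → Spec_html_compliance_matrix_py data (html_compliance_matrix_py data)

-- ===== LEMMAS AND PROOFS =====

-- z + (1 if cond else 0) = (z+1 if cond else z), used to align the two fold bodies.
theorem pv_add_ite (z : Int) (c : Prop) [Decidable c] : z + (if c then (1:Int) else 0) = if c then z + 1 else z := by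
  split_ifs <;> ring

-- B's single pass over a 4-vector accumulator equals A's four separate conditional-count folds.
theorem pv_vector_fold (reqs : List (List (String × String))) (a b c d : Int) :
    reqs.foldl
      (fun c r =>
        let s := (PySem.Dict.mk r).get? "compliance_status"
        (c.zip pvStatuses).map (fun p => p.1 + (if s == some p.2 then 1 else 0)))
      [a, b, c, d]
    = [reqs.foldl (fun acc r => if (PySem.Dict.mk r).get? "compliance_status" == some "compliant" then acc + 1 else acc) a,
       reqs.foldl (fun acc r => if (PySem.Dict.mk r).get? "compliance_status" == some "gap" then acc + 1 else acc) b,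
       reqs.foldl (fun acc r => if (PySem.Dict.mk r).get? "compliance_status" == some "in_progress" then acc + 1 else acc) c,
       reqs.foldl (fun acc r => if (PySem.Dict.mk r).get? "compliance_status" == some "not_applicable" then acc + 1 else acc) d] := by
  induction reqs generalizing a b c d with
  | nil => rfl
  | cons x xs ih =>
    rw [List.foldl_cons]
    refine ((ih _ _ _ _).trans ?_)
    simp only [List.foldl_cons, pv_add_ite]

-- ===== VERDICT (by name: the statement is the Claim_ definition above) =====
set_option maxRecDepth 8192 in
theorem html_compliance_matrix_py_spec : Claim_equal_html_compliance_matrix_py := by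
  intro data _
  unfold Spec_html_compliance_matrix_py html_compliance_matrix_py html_compliance_matrix_py_alt
  simp only []
  set reqs := (PySem.Dict.mk data).getD "requirements" [] with hreqs
  by_cases h : reqs = []
  · simp [h]
  · simp only [if_neg h, pv_vector_fold]
    rw [← String.toList_inj]
    simp [pvClasses, pvLabels, String.join, String.toList_append]
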